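-- pv_equiv track=rewrite | github.com/AraKchrUser/yandex-algorithm-trainings | 7/B.py | linelen
-- ===== SOURCE A (Python) =====
-- def linelen(n, m, events, line):
--     cnt = 0
--
--     for eventidx in range(len(events)):
--
--         if events[eventidx][1] == -1:
--             cnt += 1
--         elif events[eventidx][1] == 1:
--             cnt -= 1
--
--         if events[eventidx][1] == 0:
--             # line.append(cnt)
--             addition = 0
--             if eventidx > 0 and events[eventidx - 1][0] == events[eventidx][0] and events[eventidx - 1][1] == -1:
--                 addition += 1
--             line.append((cnt + addition, events[eventidx][2]))
--
--     return line
-- ===== SOURCE B (Python) =====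
-- def linelen(n, m, events, line):
--     # Two-pass decomposition: prefix running counts, then append all query rows at once.
--     counts = []
--     c = 0
--     for _, t, _ in events:
--         if t == -1:
--             c += 1
--         elif t == 1:
--             c -= 1
--         counts.append(c)
--     line.extend(
--         (counts[i] + (1 if i > 0 and events[i - 1][0] == a and events[i - 1][1] == -1 else 0), q)
--         for i, (a, t, q) in enumerate(events)
--         if t == 0
--     )
--     return line
-- ===== Notes on version B (the rewrite author's own statement) =====
-- stated objective: alternative
-- what changed: A interleaves counting and output in one index loop with running state; B decomposes into two passes: it first builds a prefix list of running counts, then filters the query events and reads their counts (plus the one-step look-back bonus) from that list, appending them to line in one extend.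
import Mathlib
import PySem

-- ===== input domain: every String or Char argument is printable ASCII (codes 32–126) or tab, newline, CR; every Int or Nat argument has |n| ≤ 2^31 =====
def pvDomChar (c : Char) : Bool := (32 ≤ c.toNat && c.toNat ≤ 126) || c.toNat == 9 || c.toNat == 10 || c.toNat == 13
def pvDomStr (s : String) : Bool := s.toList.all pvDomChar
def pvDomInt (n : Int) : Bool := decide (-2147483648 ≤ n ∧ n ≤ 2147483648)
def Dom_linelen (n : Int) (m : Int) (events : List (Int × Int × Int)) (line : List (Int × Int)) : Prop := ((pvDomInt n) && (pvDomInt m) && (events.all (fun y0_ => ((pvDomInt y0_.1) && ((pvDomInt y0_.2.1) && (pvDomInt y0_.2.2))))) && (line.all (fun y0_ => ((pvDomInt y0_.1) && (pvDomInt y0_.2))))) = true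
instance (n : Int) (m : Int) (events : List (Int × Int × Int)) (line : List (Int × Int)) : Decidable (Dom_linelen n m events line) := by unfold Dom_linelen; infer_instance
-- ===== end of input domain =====

-- B replaces A's single index loop by a two-pass decomposition (prefix running counts, then one
-- pass over the query events); same cost, chosen as an alternative structure. Both A and B mutate
-- `line` in place in Python (append/extend); the equivalence proved here is about the return value.

-- ===== PORT A =====
-- single loop over indices, state (cnt, line)
def linelen (n : Int) (m : Int) (events : List (Int × Int × Int)) (line : List (Int × Int)) : List (Int × Int) :=
  (List.foldl
    (fun (st : Int × List (Int × Int)) (eventidx : Int) =>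
      let e := PySem.List.pyGetD events eventidx (0, 0, 0)
      let cnt := if e.2.1 = -1 then st.1 + 1 else if e.2.1 = 1 then st.1 - 1 else st.1
      if e.2.1 = 0 then
        let prev := PySem.List.pyGetD events (eventidx - 1) (0, 0, 0)
        let addition : Int := if eventidx > 0 ∧ prev.1 = e.1 ∧ prev.2.1 = -1 then 1 else 0
        (cnt, st.2 ++ [(cnt + addition, e.2.2)])
      else (cnt, st.2))
    (0, line) (PySem.List.pyRange 0 events.length 1)).2

-- ===== PORT B =====
-- pass 1: prefix list of running counts; pass 2: filter the query events and read the prefix list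
def linelen_alt (n : Int) (m : Int) (events : List (Int × Int × Int)) (line : List (Int × Int)) : List (Int × Int) :=
  let counts := (events.foldl
    (fun (st : Int × List Int) e =>
      let c := if e.2.1 = -1 then st.1 + 1 else if e.2.1 = 1 then st.1 - 1 else st.1
      (c, st.2 ++ [c])) (0, ([] : List Int))).2
  line ++ (PySem.List.enumerate events).filterMap (fun p =>
    if p.2.2.1 = 0 then
      some (PySem.List.pyGetD counts p.1 0 +
        (if p.1 > 0 ∧ (PySem.List.pyGetD events (p.1 - 1) (0, 0, 0)).1 = p.2.1 ∧
              (PySem.List.pyGetD events (p.1 - 1) (0, 0, 0)).2.1 = -1 then 1 else 0),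
        p.2.2.2)
    else none)

-- ===== PRECONDITION & SPEC =====
def Spec_linelen (n : Int) (m : Int) (events : List (Int × Int × Int)) (line : List (Int × Int)) (out : List (Int × Int)) : Prop := out = linelen_alt n m events line
instance (n : Int) (m : Int) (events : List (Int × Int × Int)) (line : List (Int × Int)) (out : List (Int × Int)) : Decidable (Spec_linelen n m events line out) := by unfold Spec_linelen; infer_instance

-- ===== CLAIM (what is proved, stated in full; the proofs are below) =====
def Claim_equal_linelen : Prop := ∀ (n : Int) (m : Int) (events : List (Int × Int × Int)) (line : List (Int × Int)), Dom_linelen n m events line → Spec_linelen n m events line (linelen n m events line)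

-- ===== LEMMAS AND PROOFS =====

-- running-count step, total and prefix list (proof-side names for the two ports' shared arithmetic)
def pvStep (c : Int) (e : Int × Int × Int) : Int :=
  if e.2.1 = -1 then c + 1 else if e.2.1 = 1 then c - 1 else c

def pvCnt (es : List (Int × Int × Int)) : Int := es.foldl pvStep 0

def pvCountsFrom (c : Int) : List (Int × Int × Int) → List Int
  | [] => []
  | e :: r => pvStep c e :: pvCountsFrom (pvStep c e) r

lemma pvCounts_fold (es : List (Int × Int × Int)) : ∀ (c : Int) (acc : List Int),
    es.foldl (fun (st : Int × List Int) e =>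
      let c := if e.2.1 = -1 then st.1 + 1 else if e.2.1 = 1 then st.1 - 1 else st.1
      (c, st.2 ++ [c])) (c, acc) = (es.foldl pvStep c, acc ++ pvCountsFrom c es) := by
  induction es with
  | nil => simp [pvCountsFrom]
  | cons e r ih => intro c acc; simp [pvCountsFrom, ih, pvStep]

lemma pvCountsFrom_append (es : List (Int × Int × Int)) (e : Int × Int × Int) : ∀ c,
    pvCountsFrom c (es ++ [e]) = pvCountsFrom c es ++ [pvStep (es.foldl pvStep c) e] := by
  induction es with
  | nil => intro c; simp [pvCountsFrom]
  | cons x r ih => intro c; simp [pvCountsFrom, ih]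

lemma pvCountsFrom_length (es : List (Int × Int × Int)) : ∀ c, (pvCountsFrom c es).length = es.length := by
  induction es with
  | nil => intro c; simp [pvCountsFrom]
  | cons x r ih => intro c; simp [pvCountsFrom, ih]

-- pyGetD reads a prefix through an append
lemma pyGetD_append_left {α : Type} (xs ys : List α) (i : Int) (d : α)
    (h0 : 0 ≤ i) (h1 : i < xs.length) :
    PySem.List.pyGetD (xs ++ ys) i d = PySem.List.pyGetD xs i d := by
  rw [PySem.List.pyGetD_eq_getElem (xs ++ ys) d h0 (by simp; omega),
      PySem.List.pyGetD_eq_getElem xs d h0 h1]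
  exact List.getElem_append_left (by omega)

-- B's filterMap body, over a given lookup table
def pvB (tbl : List (Int × Int × Int)) (cts : List Int) (p : Int × Int × Int × Int) : Option (Int × Int) :=
  if p.2.2.1 = 0 then
    some (PySem.List.pyGetD cts p.1 0 +
      (if p.1 > 0 ∧ (PySem.List.pyGetD tbl (p.1 - 1) (0, 0, 0)).1 = p.2.1 ∧
            (PySem.List.pyGetD tbl (p.1 - 1) (0, 0, 0)).2.1 = -1 then 1 else 0),
      p.2.2.2)
  else none

-- A's loop body
def pvA (tbl : List (Int × Int × Int)) (st : Int × List (Int × Int)) (eventidx : Int) : Int × List (Int × Int) :=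
  let e := PySem.List.pyGetD tbl eventidx (0, 0, 0)
  let cnt := if e.2.1 = -1 then st.1 + 1 else if e.2.1 = 1 then st.1 - 1 else st.1
  if e.2.1 = 0 then
    let prev := PySem.List.pyGetD tbl (eventidx - 1) (0, 0, 0)
    let addition : Int := if eventidx > 0 ∧ prev.1 = e.1 ∧ prev.2.1 = -1 then 1 else 0
    (cnt, st.2 ++ [(cnt + addition, e.2.2)])
  else (cnt, st.2)

lemma pvMain (events : List (Int × Int × Int)) : ∀ (line : List (Int × Int)),
    (PySem.List.pyRange 0 events.length 1).foldl (pvA events) (0, line)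
      = (pvCnt events, line ++ (PySem.List.enumerate events).filterMap (pvB events (pvCountsFrom 0 events))) := by
  induction events using List.reverseRecOn with
  | nil => intro line; simp [pvCnt, PySem.List.pyRange_one_eq_nil, PySem.List.enumerate]
  | append_singleton es e ih =>
    intro line
    have hlen : ((es ++ [e]).length : Int) = (es.length : Int) + 1 := by simp
    rw [hlen, PySem.List.pyRange_one_succ_right (by positivity), List.foldl_append]
    have hcongr : (PySem.List.pyRange 0 es.length 1).foldl (pvA (es ++ [e])) (0, line)
        = (PySem.List.pyRange 0 es.length 1).foldl (pvA es) (0, line) := by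
      apply PySem.List.foldl_congr_mem
      intro acc x hx
      rw [PySem.List.mem_pyRange_one] at hx
      show pvA (es ++ [e]) acc x = pvA es acc x
      unfold pvA
      rw [pyGetD_append_left es [e] x _ hx.1 hx.2]
      by_cases hx0 : 0 < x
      · rw [pyGetD_append_left es [e] (x - 1) _ (by omega) (by omega)]
      · simp [hx0]
    rw [hcongr, ih]
    have hcts := pvCountsFrom_append es e 0
    have hctsLen := pvCountsFrom_length es 0
    have hlast : PySem.List.pyGetD (pvCountsFrom 0 (es ++ [e])) (es.length : Int) 0 = pvStep (pvCnt es) e := by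
      rw [hcts, PySem.List.pyGetD_eq_getElem _ _ (by positivity)
        (by simp [hctsLen])]
      have hidx : ((es.length : Int)).toNat = (pvCountsFrom 0 es).length := by simp [hctsLen]
      simp [pvCnt, hidx]
    have henum : PySem.List.enumerate (es ++ [e])
        = PySem.List.enumerate es ++ [((es.length : Int), e)] := by
      rw [PySem.List.enumerate_append]
      simp [PySem.List.enumerate]
    have hFcongr : (PySem.List.enumerate es).filterMap (pvB (es ++ [e]) (pvCountsFrom 0 (es ++ [e])))
        = (PySem.List.enumerate es).filterMap (pvB es (pvCountsFrom 0 es)) := by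
      apply List.filterMap_congr
      intro p hp
      rw [PySem.List.mem_enumerate_iff] at hp
      obtain ⟨k, hk, rfl⟩ := hp
      unfold pvB
      simp only [zero_add]
      rw [hcts, pyGetD_append_left _ _ _ _ (by positivity) (by simp [hctsLen]; omega)]
      by_cases hk0 : 0 < (k : Int)
      · rw [pyGetD_append_left es [e] _ _ (by omega) (by omega)]
      · have hk00 : k = 0 := by omega
        simp [hk00]
    have hE : PySem.List.pyGetD (es ++ [e]) (es.length : Int) (0, 0, 0) = e := by
      rw [PySem.List.pyGetD_eq_getElem _ _ (by positivity) (by simp)]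
      have hidx : ((es.length : Int)).toNat = es.length := by simp
      simp [hidx]
    have hc : pvCnt (es ++ [e]) = pvStep (pvCnt es) e := by
      simp [pvCnt, List.foldl_append]
    rw [List.foldl_cons, List.foldl_nil, henum, List.filterMap_append, hFcongr]
    unfold pvA
    simp only
    rw [hE]
    by_cases h0 : e.2.1 = 0
    · simp [pvB, h0, hlast, hc, pvStep, List.append_assoc]
    · by_cases h1 : e.2.1 = -1
      · simp [pvB, h1, hc, pvStep]
      · by_cases h2 : e.2.1 = 1
        · simp [pvB, h2, hc, pvStep]
        · simp [pvB, h0, h1, h2, hc, pvStep]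

-- ===== VERDICT (by name: the statement is the Claim_ definition above) =====
theorem linelen_spec : Claim_equal_linelen := by
  intro n m events line _
  show linelen n m events line = linelen_alt n m events line
  have hA : linelen n m events line
      = ((PySem.List.pyRange 0 events.length 1).foldl (pvA events) (0, line)).2 := rfl
  have hB : linelen_alt n m events line
      = line ++ (PySem.List.enumerate events).filterMap (pvB events (pvCountsFrom 0 events)) := by
    show line ++ (PySem.List.enumerate events).filterMap
        (pvB events (events.foldl (fun (st : Int × List Int) e =>
          let c := if e.2.1 = -1 then st.1 + 1 else if e.2.1 = 1 then st.1 - 1 else st.1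
          (c, st.2 ++ [c])) (0, ([] : List Int))).2) = _
    rw [pvCounts_fold]
    simp
  rw [hA, hB, pvMain]
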